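-- pv_equiv track=rewrite | github.com/IgnacioLCastillo/IntroduccionProgramacion | 2024/20240601_Arreglos_Evolucionado.py | udfMaximodelosPares
-- ===== SOURCE A (Python) =====
-- def udfMaximodelosPares(parreglo,ptam):
--     esPrimero=False
--     maxvalor=0
--     for i in range(0,ptam,1):
--         if parreglo[i]%2==0:
--             if esPrimero==False:
--                 maxvalor=parreglo[i]
--                 esPrimero=True
--             else:
--                 if parreglo[i]>maxvalor:
--                     maxvalor=parreglo[i]
--
--     return maxvalor,esPrimero
-- ===== SOURCE B (Python) =====
-- def udfMaximodelosPares(parreglo, ptam):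
--     evens = [parreglo[i] for i in range(ptam) if parreglo[i] % 2 == 0]
--     if evens:
--         return max(evens), True
--     return 0, False
-- ===== Notes on version B (the rewrite author's own statement) =====
-- stated objective: simpler
-- what changed: Replaces the fused running-max-with-first-flag loop by a comprehension collecting the even values among the first ptam elements followed by a library max reduction.
import Mathlib
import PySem

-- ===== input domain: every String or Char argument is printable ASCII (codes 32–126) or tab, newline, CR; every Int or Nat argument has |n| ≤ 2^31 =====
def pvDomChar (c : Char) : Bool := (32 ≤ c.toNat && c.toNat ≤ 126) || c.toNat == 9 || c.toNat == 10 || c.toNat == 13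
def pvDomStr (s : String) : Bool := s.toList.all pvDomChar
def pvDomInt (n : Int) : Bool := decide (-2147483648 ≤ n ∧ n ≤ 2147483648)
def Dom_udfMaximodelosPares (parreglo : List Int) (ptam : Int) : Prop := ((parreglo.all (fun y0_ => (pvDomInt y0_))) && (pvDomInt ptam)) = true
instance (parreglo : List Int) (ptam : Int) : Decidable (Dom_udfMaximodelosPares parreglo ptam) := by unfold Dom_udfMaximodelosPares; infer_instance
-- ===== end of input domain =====

-- B changes the decomposition only (collect the even prefix values, then a max reduction); same O(n) cost.

-- ===== PORT A =====
-- loop body of A: st = (esPrimero, maxvalor), v = parreglo[i]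
def pvStepA (st : Bool × Int) (v : Int) : Bool × Int :=
  if PySem.Int.mod v 2 = 0 then
    if st.1 = false then (true, v)
    else if v > st.2 then (st.1, v) else st
  else st

def udfMaximodelosPares (parreglo : List Int) (ptam : Int) : Int × Bool :=
  let st := (PySem.List.pyRange 0 ptam 1).foldl
    (fun st i => pvStepA st (PySem.List.pyGetD parreglo i 0)) (false, 0)
  (st.2, st.1)

-- ===== PORT B =====
-- evens = [parreglo[i] for i in range(ptam) if parreglo[i] % 2 == 0]; then max(evens) if nonempty
def udfMaximodelosPares_alt (parreglo : List Int) (ptam : Int) : Int × Bool :=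
  let evens := ((PySem.List.pyRange 0 ptam 1).filter
      (fun i => decide (PySem.Int.mod (PySem.List.pyGetD parreglo i 0) 2 = 0))).map
      (fun i => PySem.List.pyGetD parreglo i 0)
  match PySem.List.max? evens (fun x => x) with
  | some m => (m, true)
  | none => (0, false)

-- ===== PRECONDITION & SPEC =====
-- exactly the inputs on which the Python returns: both index parreglo[i] for every i < ptam
def Pre_udfMaximodelosPares (parreglo : List Int) (ptam : Int) : Prop :=
  ptam ≤ (parreglo.length : Int)
instance (parreglo : List Int) (ptam : Int) : Decidable (Pre_udfMaximodelosPares parreglo ptam) := by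
  unfold Pre_udfMaximodelosPares; infer_instance

def pvWitness_udfMaximodelosPares : List Int × Int := ([3, 4, 2, 7], 3)

def Spec_udfMaximodelosPares (parreglo : List Int) (ptam : Int) (out : Int × Bool) : Prop := out = udfMaximodelosPares_alt parreglo ptam
instance (parreglo : List Int) (ptam : Int) (out : Int × Bool) : Decidable (Spec_udfMaximodelosPares parreglo ptam out) := by unfold Spec_udfMaximodelosPares; infer_instance

-- ===== CLAIM (what is proved, stated in full; the proofs are below) =====
def Claim_equal_udfMaximodelosPares : Prop := ∀ (parreglo : List Int) (ptam : Int), Dom_udfMaximodelosPares parreglo ptam → Pre_udfMaximodelosPares parreglo ptam → Spec_udfMaximodelosPares parreglo ptam (udfMaximodelosPares parreglo ptam)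

-- ===== LEMMAS AND PROOFS =====

theorem pv_mod2 (v : Int) : (PySem.Int.mod v 2 = 0) ↔ (2:Int) ∣ v := by
  rw [PySem.Int.mod, Int.fmod_eq_emod]; omega

-- mapping after filtering through the same function commutes with filtering after mapping
theorem pv_map_filter {α β : Type} (f : α → β) (p : β → Bool) (l : List α) :
    (l.filter (fun a => p (f a))).map f = (l.map f).filter p := by
  induction l with
  | nil => rfl
  | cons a l ih =>
    simp only [List.filter_cons, List.map_cons]
    by_cases h : p (f a) = true
    · simp [h, ih]
    · simp [h, ih]

-- B's comprehension equals the even filter of the taken prefix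
theorem pv_evens_eq (xs : List Int) (t : Int) (hle : t ≤ (xs.length : Int)) :
    ((PySem.List.pyRange 0 t 1).filter
        (fun i => decide (PySem.Int.mod (PySem.List.pyGetD xs i 0) 2 = 0))).map
        (fun i => PySem.List.pyGetD xs i 0)
      = (xs.take t.toNat).filter (fun v => decide (PySem.Int.mod v 2 = 0)) := by
  by_cases hpos : 0 ≤ t
  · set l' := xs.take t.toNat with hl'
    have hlen : (l'.length : Int) = t := by
      simp [hl', List.length_take]; omega
    have hget : ∀ i ∈ PySem.List.pyRange 0 t 1,
        PySem.List.pyGetD xs i 0 = PySem.List.pyGetD l' i 0 := by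
      intro i hi
      rw [PySem.List.mem_pyRange_one] at hi
      have hll : (l'.length : Int) = t := hlen
      rw [PySem.List.pyGetD_eq_getElem xs 0 hi.1 (by omega),
          PySem.List.pyGetD_eq_getElem l' 0 hi.1 (by omega)]
      simp [hl', List.getElem_take]
    have hfilter :
        (PySem.List.pyRange 0 t 1).filter
            (fun i => decide (PySem.Int.mod (PySem.List.pyGetD xs i 0) 2 = 0))
          = (PySem.List.pyRange 0 t 1).filter
            (fun i => decide (PySem.Int.mod (PySem.List.pyGetD l' i 0) 2 = 0)) := by
      apply List.filter_congr
      intro i hi; rw [hget i hi]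
    rw [hfilter]
    have hmap :
        ((PySem.List.pyRange 0 t 1).filter
            (fun i => decide (PySem.Int.mod (PySem.List.pyGetD l' i 0) 2 = 0))).map
            (fun i => PySem.List.pyGetD xs i 0)
          = ((PySem.List.pyRange 0 t 1).filter
            (fun i => decide (PySem.Int.mod (PySem.List.pyGetD l' i 0) 2 = 0))).map
            (fun i => PySem.List.pyGetD l' i 0) := by
      apply List.map_congr_left
      intro i hi
      exact hget i (List.mem_of_mem_filter hi)
    rw [hmap, pv_map_filter (fun i => PySem.List.pyGetD l' i 0)
          (fun v => decide (PySem.Int.mod v 2 = 0))]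
    rw [← hlen, PySem.List.map_pyGetD_pyRange_zero']
  · have h1 : PySem.List.pyRange 0 t 1 = [] :=
      PySem.List.pyRange_one_eq_nil (by omega)
    have h2 : t.toNat = 0 := by omega
    simp [h1, h2]

-- A's running loop from a set flag is the running max over the even values
theorem pv_stepA_true (l : List Int) (m : Int) :
    l.foldl pvStepA (true, m)
      = (true, (l.filter (fun v => decide (PySem.Int.mod v 2 = 0))).foldl max m) := by
  induction l generalizing m with
  | nil => simp
  | cons v l ih =>
    rw [List.foldl_cons, List.filter_cons]
    by_cases he : PySem.Int.mod v 2 = 0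
    · have hd := (pv_mod2 v).mp he
      have hstep : pvStepA (true, m) v = (true, max m v) := by
        simp only [pvStepA, if_pos he]
        split_ifs with h1 h2 <;> simp_all <;> omega
      rw [hstep, ih]
      simp [hd]
    · have hd : ¬ (2:Int) ∣ v := fun d => he ((pv_mod2 v).mpr d)
      have hstep : pvStepA (true, m) v = (true, m) := by
        simp only [pvStepA, if_neg he]
      rw [hstep, ih]
      simp [hd]

-- A's full loop characterised by the even filter
theorem pv_stepA_spec (l : List Int) :
    l.foldl pvStepA (false, 0)
      = match l.filter (fun v => decide (PySem.Int.mod v 2 = 0)) with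
        | [] => (false, 0)
        | h :: t => (true, t.foldl max h) := by
  induction l with
  | nil => simp
  | cons v l ih =>
    rw [List.foldl_cons, List.filter_cons]
    by_cases he : PySem.Int.mod v 2 = 0
    · have hd := (pv_mod2 v).mp he
      have hstep : pvStepA (false, 0) v = (true, v) := by
        simp only [pvStepA, if_pos he]; rfl
      rw [hstep, pv_stepA_true]
      simp [hd]
    · have hd : ¬ (2:Int) ∣ v := fun d => he ((pv_mod2 v).mpr d)
      have hstep : pvStepA (false, 0) v = (false, 0) := by
        simp only [pvStepA, if_neg he]
      rw [hstep, ih]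
      simp [hd]

-- A's indexed range loop is the loop over the taken prefix
theorem pv_rangeA (parreglo : List Int) (ptam : Int)
    (hle : ptam ≤ (parreglo.length : Int)) :
    (PySem.List.pyRange 0 ptam 1).foldl
        (fun st i => pvStepA st (PySem.List.pyGetD parreglo i 0)) (false, 0)
      = (parreglo.take ptam.toNat).foldl pvStepA (false, 0) := by
  by_cases hpos : 0 ≤ ptam
  · set l' := parreglo.take ptam.toNat with hl'
    have hlen : l'.length = ptam.toNat := by
      simp [hl', List.length_take]; omega
    have hb : ptam = (l'.length : Int) := by rw [hlen]; omega
    rw [hb]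
    rw [PySem.List.foldl_congr_mem (g := fun st i => pvStepA st (PySem.List.pyGetD l' i 0))]
    · exact PySem.List.foldl_pyRange_zero_pyGetD' l' 0 pvStepA (false, 0)
    · intro acc x hx
      rw [PySem.List.mem_pyRange_one] at hx
      have hxl : x.toNat < l'.length := by omega
      have h1 : PySem.List.pyGetD parreglo x 0 = parreglo[x.toNat] :=
        PySem.List.pyGetD_eq_getElem parreglo 0 hx.1 (by omega)
      have h2 : PySem.List.pyGetD l' x 0 = l'[x.toNat] :=
        PySem.List.pyGetD_eq_getElem l' 0 hx.1 (by omega)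
      rw [h1, h2]
      congr 1
      simp [hl', List.getElem_take]
  · have h1 : PySem.List.pyRange 0 ptam 1 = [] :=
      PySem.List.pyRange_one_eq_nil (by omega)
    have h2 : ptam.toNat = 0 := by omega
    simp [h1, h2]

-- ===== VERDICT (by name: the statement is the Claim_ definition above) =====
theorem udfMaximodelosPares_spec : Claim_equal_udfMaximodelosPares := by
  intro parreglo ptam _ hpre
  unfold Spec_udfMaximodelosPares udfMaximodelosPares udfMaximodelosPares_alt
  rw [pv_evens_eq parreglo ptam hpre, pv_rangeA parreglo ptam hpre, pv_stepA_spec]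
  cases hf : (parreglo.take ptam.toNat).filter (fun v => decide (PySem.Int.mod v 2 = 0)) with
  | nil => simp [PySem.List.max?]
  | cons h t => simp [PySem.List.max?_id_cons]
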